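-- pv_equiv track=rewrite | github.com/Mac-Adam/Advent_Calendar | 2023/day12/day12.py | find_possible_places
-- ===== SOURCE A (Python) =====
-- def find_possible_places(data, l, start=0):
--     idx = []
--     streak = 0
--     last_possible = len(data)
--     for i in range(start, len(data)):
--         if data[i] == "#" or data[i] == "?":
--             if data[i] == "#" and last_possible == len(data):
--                 last_possible = i
--             streak += 1
--         else:
--             streak = 0
--         if streak >= l:
--
--             index = i - l + 1
--             idx.append(index)
--             if index >= last_possible:
--                 return idx
--     return idx
-- ===== SOURCE B (Python) =====
-- def find_possible_places(data, l, start=0):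
--     n = len(data)
--     # first '#' at or after start (n when there is none)
--     first_hash = next((i for i in range(start, n) if data[i] == "#"), n)
--     idx = []
--     for s in range(start, n - l + 1):
--         if all(c == "#" or c == "?" for c in data[s:s + l]):
--             idx.append(s)
--             if s >= first_hash:
--                 return idx
--     return idx
-- ===== Notes on version B (the rewrite author's own statement) =====
-- stated objective: alternative
-- what changed: Replaces the running streak counter and incrementally-tracked last_possible with a direct formulation: precompute the first '#' index at or after start once, then slide a window over candidate start positions and test each window wholesale, returning after the first accepted position at or past that '#'.
-- intended difference: On non-positive l with 0 <= start <= len(data)-l, A returns the window end positions shifted by -l+1, an artefact of its streak formulation, while B returns the start positions themselves, which is what 'possible start positions for a group of length l' means. — e.g. on find_possible_places("?", 0, 0): A returns [1], B returns [0, 1]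
-- outside the precondition, e.g. on find_possible_places('x#.x', 2, -2): A returns [], B returns [-2, -1]
import Mathlib
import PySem

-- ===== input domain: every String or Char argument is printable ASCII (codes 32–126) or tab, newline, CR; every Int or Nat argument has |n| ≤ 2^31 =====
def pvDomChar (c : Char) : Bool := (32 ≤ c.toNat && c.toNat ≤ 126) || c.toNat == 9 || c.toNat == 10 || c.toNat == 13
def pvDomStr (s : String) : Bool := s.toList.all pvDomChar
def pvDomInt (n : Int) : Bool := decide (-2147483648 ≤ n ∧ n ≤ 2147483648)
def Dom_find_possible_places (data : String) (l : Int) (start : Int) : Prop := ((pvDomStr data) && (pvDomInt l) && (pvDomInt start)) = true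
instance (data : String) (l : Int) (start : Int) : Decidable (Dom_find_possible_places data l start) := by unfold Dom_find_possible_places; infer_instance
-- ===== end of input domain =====

-- B replaces A's running streak counter and incrementally-tracked last_possible by a
-- precomputed first-'#' index plus a whole-window validity test per candidate position
-- (alternative formulation, not faster).

-- ===== PORT A =====
-- A's for-loop with early return, over range(start, len(data)); state (idx, streak, last_possible).
def loopA (cs : List Char) (l n : Int) : List Int → List Int → Int → Int → List Int
  | [], idx, _, _ => idx
  | i :: rest, idx, streak, lp =>
    let c := PySem.List.pyGetD cs i ' '   -- in range for every index the loop visits under Pre_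
    let st' := if c == '#' || c == '?' then
                 (streak + 1, if c == '#' && decide (lp = n) then i else lp)
               else (0, lp)
    if l ≤ st'.1 then
      let index := i - l + 1
      let idx' := idx ++ [index]
      if st'.2 ≤ index then idx' else loopA cs l n rest idx' st'.1 st'.2
    else loopA cs l n rest idx st'.1 st'.2

def find_possible_places (data : String) (l : Int) (start : Int) : List Int :=
  let cs := data.toList
  let n : Int := cs.length
  loopA cs l n (PySem.List.pyRange start n 1) [] 0 n

-- ===== PORT B =====
-- first '#' at or after start, n when there is none  (Source B's next((i for i in range(start, n) …), n))
def firstHashB (cs : List Char) (n : Int) : List Int → Int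
  | [] => n
  | i :: rest => if PySem.List.pyGetD cs i ' ' == '#' then i else firstHashB cs n rest

-- Source B's for-loop over candidate start positions s with whole-window check
-- (counting loop: s runs from start while s < n - l + 1, i.e. for the range's (n-l+1 - start) steps)
def loopB (cs : List Char) (l fh : Int) : Int → Nat → List Int → List Int
  | _, 0, idx => idx
  | s, fuel+1, idx =>
    if (PySem.List.slice cs (some s) (some (s + l))).all (fun c => c == '#' || c == '?') then
      let idx' := idx ++ [s]
      if fh ≤ s then idx' else loopB cs l fh (s + 1) fuel idx'
    else loopB cs l fh (s + 1) fuel idx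

def find_possible_places_alt (data : String) (l : Int) (start : Int) : List Int :=
  let cs := data.toList
  let n : Int := cs.length
  let fh := firstHashB cs n (PySem.List.pyRange start n 1)
  loopB cs l fh start ((n - l + 1) - start).toNat []

-- ===== PRECONDITION & SPEC =====
-- Pre_ excludes negative start, on which Python's negative indexing silently wraps around
-- (or raises IndexError for start < -len(data)).
def Pre_find_possible_places (data : String) (l : Int) (start : Int) : Prop := 0 ≤ start
instance (data : String) (l : Int) (start : Int) : Decidable (Pre_find_possible_places data l start) := by unfold Pre_find_possible_places; infer_instance

def pvWitness_find_possible_places : String × Int × Int := ("?#.??#", 2, 0)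

-- On non-positive group length l (with 0 ≤ start ≤ len(data) - l), A returns window END
-- positions shifted by -l+1 (an artefact of its streak formulation) while B returns the start
-- positions themselves, which is what "possible start positions for a group of length l" means.
def D_find_possible_places (data : String) (l : Int) (start : Int) : Prop :=
  l ≤ 0 ∧ 0 ≤ start ∧ start ≤ (data.toList.length : Int) - l
instance (data : String) (l : Int) (start : Int) : Decidable (D_find_possible_places data l start) := by unfold D_find_possible_places; infer_instance

def Spec_find_possible_places (data : String) (l : Int) (start : Int) (out : List Int) : Prop := ¬ D_find_possible_places data l start → out = find_possible_places_alt data l start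
instance (data : String) (l : Int) (start : Int) (out : List Int) : Decidable (Spec_find_possible_places data l start out) := by unfold Spec_find_possible_places; infer_instance

def pvDiffWitness_find_possible_places : String × Int × Int := ("?", 0, 0)
def pvDiffWitnessOut_find_possible_places : (List Int) × (List Int) := ([1], [0, 1])

-- ===== CLAIM (what is proved, stated in full; the proofs are below) =====
def Claim_unchanged_find_possible_places : Prop := ∀ (data : String) (l : Int) (start : Int), Dom_find_possible_places data l start → Pre_find_possible_places data l start → Spec_find_possible_places data l start (find_possible_places data l start)
def Claim_changed_find_possible_places : Prop := Dom_find_possible_places (pvDiffWitness_find_possible_places.1) (pvDiffWitness_find_possible_places.2.1) (pvDiffWitness_find_possible_places.2.2) ∧ Pre_find_possible_places (pvDiffWitness_find_possible_places.1) (pvDiffWitness_find_possible_places.2.1) (pvDiffWitness_find_possible_places.2.2) ∧ D_find_possible_places (pvDiffWitness_find_possible_places.1) (pvDiffWitness_find_possible_places.2.1) (pvDiffWitness_find_possible_places.2.2) ∧ find_possible_places (pvDiffWitness_find_possible_places.1) (pvDiffWitness_find_possible_places.2.1) (pvDiffWitness_find_possible_places.2.2) = pvDiffWitnessOut_find_possible_places.1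 ∧ find_possible_places_alt (pvDiffWitness_find_possible_places.1) (pvDiffWitness_find_possible_places.2.1) (pvDiffWitness_find_possible_places.2.2) = pvDiffWitnessOut_find_possible_places.2 ∧ pvDiffWitnessOut_find_possible_places.1 ≠ pvDiffWitnessOut_find_possible_places.2
def Claim_exact_find_possible_places : Prop := ∀ (data : String) (l : Int) (start : Int), Dom_find_possible_places data l start → Pre_find_possible_places data l start → D_find_possible_places data l start → find_possible_places data l start ≠ find_possible_places_alt data l start

-- ===== LEMMAS AND PROOFS =====

def valc (c : Char) : Bool := c == '#' || c == '?'
def runv (cs : List Char) (start : Int) : Nat → Int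
  | 0 => 0
  | k+1 => if valc (PySem.List.pyGetD cs (start + k) ' ') then runv cs start k + 1 else 0

theorem runv_ge_iff (cs : List Char) (start : Int) (k j : Nat) :
    ((j : Int) ≤ runv cs start k) ↔
      (j ≤ k ∧ ∀ t : Nat, t < j → valc (PySem.List.pyGetD cs (start + k - 1 - t) ' ') = true) := by
  induction k generalizing j with
  | zero =>
    simp only [runv]
    constructor
    · intro h
      have hj : j = 0 := by omega
      subst hj; exact ⟨le_refl _, fun t ht => absurd ht (by omega)⟩
    · intro ⟨h1, _⟩
      have hj : j = 0 := by omega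
      subst hj; simp
  | succ k ih =>
    simp only [runv]
    by_cases hv : valc (PySem.List.pyGetD cs (start + k) ' ') = true
    · rw [if_pos hv]
      cases j with
      | zero =>
        have h0 := (ih 0).mpr ⟨Nat.zero_le _, fun t ht => absurd ht (by omega)⟩
        constructor
        · intro _; exact ⟨by omega, fun t ht => absurd ht (by omega)⟩
        · intro _
          push_cast at h0 ⊢; omega
      | succ j' =>
        have : ((j' + 1 : Nat) : Int) ≤ runv cs start k + 1 ↔ (j' : Int) ≤ runv cs start k := by
          push_cast; omega
        rw [this, ih j']
        constructor
        · intro ⟨h1, h2⟩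
          refine ⟨by omega, fun t ht => ?_⟩
          cases t with
          | zero =>
            have he : start + (↑(k+1):Int) - 1 - (0:Nat) = start + k := by push_cast; omega
            simp only [Nat.cast_zero] at *
            rw [show start + (↑(k+1):Int) - 1 - 0 = start + k by push_cast; omega]
            exact hv
          | succ t' =>
            have := h2 t' (by omega)
            have he : start + (k:Int) - 1 - t' = start + (↑(k+1):Int) - 1 - (t'+1) := by push_cast; omega
            rwa [he] at this
        · intro ⟨h1, h2⟩
          refine ⟨by omega, fun t ht => ?_⟩
          have := h2 (t+1) (by omega)
          have he : start + (↑(k+1):Int) - 1 - (↑(t+1):Int) = start + (k:Int) - 1 - t := by push_cast; omega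
          rwa [he] at this
    · rw [if_neg hv]
      constructor
      · intro h
        have hj : j = 0 := by omega
        subst hj; exact ⟨by omega, fun t ht => absurd ht (by omega)⟩
      · intro ⟨h1, h2⟩
        rcases Nat.eq_zero_or_pos j with h0 | h0
        · subst h0; simp
        · exfalso
          have := h2 0 h0
          have he : start + (↑(k+1):Int) - 1 - (0:Nat) = start + k := by push_cast; omega
          rw [he] at this
          exact hv this
def fhv (cs : List Char) (start n : Int) : Nat → Int
  | 0 => n
  | k+1 =>
    let prev := fhv cs start n k
    if PySem.List.pyGetD cs (start + k) ' ' == '#' && decide (prev = n) then start + k else prev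

theorem fhv_stable (cs : List Char) (start n : Int) (k j : Nat)
    (h : fhv cs start n k ≠ n) : fhv cs start n (k + j) = fhv cs start n k := by
  induction j with
  | zero => rfl
  | succ j ih =>
    show fhv cs start n (k+j+1) = _
    simp only [fhv]
    rw [ih]
    simp [h]

theorem fhv_of_init (cs : List Char) (start n : Int) (k j : Nat)
    (h : fhv cs start n k = n) :
    fhv cs start n (k + j) = n ∨ start + k ≤ fhv cs start n (k + j) := by
  induction j with
  | zero => left; exact h
  | succ j ih =>
    show (fhv cs start n (k+j+1) = n ∨ _)
    simp only [fhv, Nat.add_eq]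
    split
    · right; push_cast; omega
    · exact ih

theorem window_all_iff (cs : List Char) (p : Char → Bool) (a L : Nat) (h : a + L ≤ cs.length) :
    (((cs.drop a).take L).all p = true) ↔ ∀ t : Nat, t < L → p (cs.getD (a + t) ' ') = true := by
  rw [List.all_eq_true]
  have hlen : ((cs.drop a).take L).length = L := by
    simp [List.length_take, List.length_drop]; omega
  constructor
  · intro hall t ht
    have hm : ((cs.drop a).take L)[t] ∈ (cs.drop a).take L := by
      exact List.getElem_mem (by omega)
    have := hall _ hm
    rw [List.getElem_take, List.getElem_drop] at this
    rwa [List.getD_eq_getElem cs ' ' (by omega)]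
  · intro hp x hx
    obtain ⟨t, ht, rfl⟩ := List.mem_iff_getElem.mp hx
    rw [List.getElem_take, List.getElem_drop]
    have := hp t (by omega)
    rwa [List.getD_eq_getElem cs ' ' (by omega)] at this


theorem streak_iff_window (cs : List Char) (l start : Int) (k : Nat)
    (hl : 1 ≤ l) (hs : 0 ≤ start) (hn : start + (k : Int) < (cs.length : Int)) :
    (l ≤ runv cs start (k + 1)) ↔
      (start ≤ start + k - l + 1 ∧
        ((PySem.List.slice cs (some (start + k - l + 1)) (some (start + k + 1))).all
          (fun c => c == '#' || c == '?')) = true) := by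
  rw [show l = ((l.toNat : Nat) : Int) by omega]
  rw [runv_ge_iff]
  constructor
  · intro ⟨h1, h2⟩
    have hsle : (0:Int) ≤ start + k - l.toNat + 1 := by omega
    constructor
    · omega
    · rw [PySem.List.slice_toNat _ hsle (by omega)]
      rw [window_all_iff cs _ _ _ (by omega)]
      intro t ht
      have htl : t < l.toNat := by omega
      have := h2 (l.toNat - 1 - t) (by omega)
      have he : start + (↑(k+1):Int) - 1 - (↑(l.toNat - 1 - t) : Int) = ((start + ↑k - ↑l.toNat + 1).toNat + t : Nat) := by
        push_cast; omega
      rw [he] at this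
      rw [PySem.List.pyGetD_natCast] at this
      have harith : (start + ↑k + 1).toNat - (start + ↑k - ↑l.toNat + 1).toNat = l.toNat := by omega
      rw [harith] at ht
      simpa [valc] using this
  · intro ⟨h1, h2⟩
    have hsle : (0:Int) ≤ start + k - l.toNat + 1 := by omega
    rw [PySem.List.slice_toNat _ hsle (by omega)] at h2
    have harith : (start + ↑k + 1).toNat - (start + ↑k - ↑l.toNat + 1).toNat = l.toNat := by omega
    rw [harith] at h2
    rw [window_all_iff cs _ _ _ (by omega)] at h2
    refine ⟨by omega, fun t ht => ?_⟩
    have := h2 (l.toNat - 1 - t) (by omega)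
    have he : ((start + ↑k - ↑l.toNat + 1).toNat + (l.toNat - 1 - t) : Nat) = ((start + (↑(k+1):Int) - 1 - t).toNat : Nat) := by
      push_cast; omega
    rw [he] at this
    have : valc (PySem.List.pyGetD cs ((start + (↑(k+1):Int) - 1 - ↑t).toNat : Nat) ' ') = true := by
      simpa [valc, PySem.List.pyGetD_natCast] using this
    rwa [show ((((start + (↑(k+1):Int) - 1 - ↑t).toNat : Nat)) : Int) = start + (↑(k+1):Int) - 1 - ↑t by push_cast; omega] at this

theorem firstHashB_eq (cs : List Char) (start n : Int) (hn : n = (cs.length : Int)) (hs : 0 ≤ start) (k : Nat)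
    (hk : start + (k : Int) ≤ n) (h : fhv cs start n k = n) :
    firstHashB cs n (PySem.List.pyRange (start + k) n 1) = fhv cs start n (n - start).toNat := by
  by_cases hend : start + (k : Int) = n
  · rw [PySem.List.pyRange_one_eq_nil (by omega)]
    have hkm : k = (n - start).toNat := by omega
    rw [hkm] at h
    rw [firstHashB]
    exact h.symm
  · rw [PySem.List.pyRange_one_cons (by omega)]
    rw [firstHashB]
    by_cases hc : (PySem.List.pyGetD cs (start + (k:Int)) ' ' == '#') = true
    · rw [if_pos hc]
      have hk1 : fhv cs start n (k + 1) = start + k := by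
        simp only [fhv]
        rw [if_pos]
        simp [hc, h]
      have hne : fhv cs start n (k+1) ≠ n := by rw [hk1]; omega
      have hst := fhv_stable cs start n (k+1) ((n - start).toNat - (k+1)) hne
      rw [show (k + 1) + ((n - start).toNat - (k+1)) = (n - start).toNat by omega] at hst
      rw [hst, hk1]
    · rw [if_neg hc]
      have hk1 : fhv cs start n (k + 1) = n := by
        simp only [fhv]
        rw [if_neg]
        · exact h
        · exact fun hcon => hc (by simp [((Bool.and_eq_true _ _).mp hcon).1])
      have := firstHashB_eq cs start n hn hs (k+1) (by push_cast; omega) hk1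
      push_cast at this
      rw [add_assoc]
      exact this
termination_by (n - (start + k)).toNat
decreasing_by all_goals omega

theorem mainA (cs : List Char) (l start n : Int) (hn : n = (cs.length : Int))
    (hl : 1 ≤ l) (hs : 0 ≤ start) (k : Nat) (hk : start + (k : Int) ≤ n) (idx : List Int) :
    loopA cs l n (PySem.List.pyRange (start + (k : Int)) n 1) idx (runv cs start k) (fhv cs start n k)
      = loopB cs l (fhv cs start n (n - start).toNat)
          (max start (start + (k : Int) - l + 1))
          ((n - l + 1) - max start (start + (k : Int) - l + 1)).toNat idx := by
  by_cases hend : start + (k : Int) = n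
  · have hM : start + (k : Int) - l + 1 ≤ max start (start + (k : Int) - l + 1) := le_max_right _ _
    rw [PySem.List.pyRange_one_eq_nil (by omega),
        show ((n - l + 1) - max start (start + (k : Int) - l + 1)).toNat = 0 from by omega]
    rfl
  · have hin : start + (k : Int) < n := by omega
    have hpair : (if PySem.List.pyGetD cs (start + (k:Int)) ' ' == '#' || PySem.List.pyGetD cs (start + (k:Int)) ' ' == '?' then
                   (runv cs start k + 1, if PySem.List.pyGetD cs (start + (k:Int)) ' ' == '#' && decide (fhv cs start n k = n) then start + (k:Int) else fhv cs start n k)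
                 else ((0:Int), fhv cs start n k)) = (runv cs start (k+1), fhv cs start n (k+1)) := by
      by_cases hv : (PySem.List.pyGetD cs (start + (k:Int)) ' ' == '#' || PySem.List.pyGetD cs (start + (k:Int)) ' ' == '?') = true
      · rw [if_pos hv]
        simp only [runv, fhv, valc, hv, if_true]
      · rw [if_neg hv]
        have hvv : (PySem.List.pyGetD cs (start + (k:Int)) ' ' == '#' || PySem.List.pyGetD cs (start + (k:Int)) ' ' == '?') = false := Bool.eq_false_iff.mpr hv
        have hnh : (PySem.List.pyGetD cs (start + (k:Int)) ' ' == '#') = false := (Bool.or_eq_false_iff.mp hvv).1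
        have hnq : (PySem.List.pyGetD cs (start + (k:Int)) ' ' == '?') = false := (Bool.or_eq_false_iff.mp hvv).2
        simp [runv, fhv, valc, hnh, hnq]
    have hkmax : k + 1 ≤ (n - start).toNat := by omega
    have hstab : ∀ h : fhv cs start n (k+1) ≠ n, fhv cs start n (n - start).toNat = fhv cs start n (k+1) := by
      intro h
      have := fhv_stable cs start n (k+1) ((n - start).toNat - (k+1)) h
      rwa [show (k+1) + ((n - start).toNat - (k+1)) = (n - start).toNat by omega] at this
    have hretiff : (fhv cs start n (k+1) ≤ start + (k:Int) - l + 1) ↔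
        (fhv cs start n (n - start).toNat ≤ start + (k:Int) - l + 1) := by
      constructor
      · intro h
        have hne : fhv cs start n (k+1) ≠ n := by intro he; rw [he] at h; omega
        rw [hstab hne]; exact h
      · intro h
        by_cases hne : fhv cs start n (k+1) = n
        · exfalso
          have h2 := fhv_of_init cs start n (k+1) ((n - start).toNat - (k+1)) hne
          rw [show (k+1) + ((n - start).toNat - (k+1)) = (n - start).toNat by omega] at h2
          rcases h2 with h2 | h2
          · rw [h2] at h; omega
          · push_cast at h2; omega
        · rw [hstab hne] at h; exact h
    rw [PySem.List.pyRange_one_cons (show start + (k:Int) < n by omega)]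
    simp only [loopA]
    rw [hpair]
    by_cases happ : l ≤ runv cs start (k+1)
    · obtain ⟨hsle, hwinB⟩ := (streak_iff_window cs l start k hl hs (by omega)).mp happ
      rw [if_pos happ]
      rw [max_eq_right hsle]
      rw [show ((n - l + 1) - (start + (k:Int) - l + 1)).toNat
            = ((n - l + 1) - (start + (k:Int) - l + 1 + 1)).toNat + 1 from by omega]
      simp only [loopB]
      rw [show start + (k:Int) - l + 1 + l = start + (k:Int) + 1 by ring]
      rw [if_pos hwinB]
      by_cases hret : fhv cs start n (k+1) ≤ start + (k:Int) - l + 1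
      · rw [if_pos hret, if_pos (hretiff.mp hret)]
      · rw [if_neg hret, if_neg (fun h => hret (hretiff.mpr h))]
        have ih := mainA cs l start n hn hl hs (k+1) (by push_cast; omega) (idx ++ [start + (k:Int) - l + 1])
        push_cast at ih
        rw [max_eq_right (by omega)] at ih
        rw [show start + ((k:Int) + 1) - l + 1 = start + (k:Int) - l + 1 + 1 by ring] at ih
        rw [show start + ((k:Int) + 1) = start + (k:Int) + 1 by ring] at ih
        exact ih
    · rw [if_neg happ]
      have ih := mainA cs l start n hn hl hs (k+1) (by push_cast; omega) idx
      push_cast at ih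
      rw [show start + ((k:Int) + 1) = start + (k:Int) + 1 by ring] at ih
      by_cases hsge : start ≤ start + (k:Int) - l + 1
      · have hwinF : ((PySem.List.slice cs (some (start + (k:Int) - l + 1)) (some (start + (k:Int) + 1))).all
            (fun c => c == '#' || c == '?')) ≠ true := by
          intro hw
          exact happ ((streak_iff_window cs l start k hl hs (by omega)).mpr ⟨hsge, hw⟩)
        rw [max_eq_right hsge]
        rw [show ((n - l + 1) - (start + (k:Int) - l + 1)).toNat
              = ((n - l + 1) - (start + (k:Int) - l + 1 + 1)).toNat + 1 from by omega]
        simp only [loopB]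
        rw [show start + (k:Int) - l + 1 + l = start + (k:Int) + 1 by ring]
        rw [if_neg hwinF]
        rw [max_eq_right (by omega)] at ih
        rw [show start + (k:Int) + 1 - l + 1 = start + (k:Int) - l + 1 + 1 by ring] at ih
        exact ih
      · rw [max_eq_left (by omega)]
        rw [max_eq_left (by omega)] at ih
        exact ih
termination_by (n - (start + (k:Int))).toNat
decreasing_by all_goals omega

-- every loopA/loopB result extends its accumulator
theorem loopA_prefix (cs : List Char) (l n : Int) (rng : List Int) :
    ∀ (idx : List Int) (streak lp : Int), ∃ t, loopA cs l n rng idx streak lp = idx ++ t := by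
  induction rng with
  | nil => intro idx streak lp; exact ⟨[], by simp [loopA]⟩
  | cons i rest ih =>
    intro idx streak lp
    simp only [loopA]
    have key : ∀ st : Int × Int, ∃ t,
        (if l ≤ st.1 then
          (if st.2 ≤ i - l + 1 then idx ++ [i - l + 1]
           else loopA cs l n rest (idx ++ [i - l + 1]) st.1 st.2)
         else loopA cs l n rest idx st.1 st.2) = idx ++ t := by
      intro st
      split_ifs with h1 h2
      · exact ⟨[i - l + 1], rfl⟩
      · obtain ⟨t, ht⟩ := ih (idx ++ [i - l + 1]) st.1 st.2
        exact ⟨[i - l + 1] ++ t, by rw [ht]; simp⟩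
      · exact ih idx st.1 st.2
    exact key _

theorem loopB_prefix (cs : List Char) (l fh : Int) (fuel : Nat) :
    ∀ (s : Int) (idx : List Int), ∃ t, loopB cs l fh s fuel idx = idx ++ t := by
  induction fuel with
  | zero => intro s idx; exact ⟨[], by simp [loopB]⟩
  | succ fuel ih =>
    intro s idx
    simp only [loopB]
    split
    · split
      · exact ⟨[s], rfl⟩
      · obtain ⟨t, ht⟩ := ih (s + 1) (idx ++ [s])
        exact ⟨[s] ++ t, by simp [ht]⟩
    · exact ih (s + 1) idx

-- with l ≤ 0 the window ending before position start-l+1 is empty, hence valid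
theorem slice_empty_of_le (cs : List Char) (a b : Int) (h0 : 0 ≤ b) (hb : b ≤ a) :
    PySem.List.slice cs (some a) (some b) = [] := by
  apply List.eq_nil_of_length_eq_zero
  rw [PySem.List.length_slice]
  unfold PySem.List.clampIdx
  split_ifs <;> omega

-- a slice starting at or past the end of the list is empty
theorem slice_empty_of_ge_len (cs : List Char) (a b : Int) (h : (cs.length : Int) ≤ a) :
    PySem.List.slice cs (some a) (some b) = [] := by
  apply List.eq_nil_of_length_eq_zero
  rw [PySem.List.length_slice]
  unfold PySem.List.clampIdx
  split_ifs <;> omega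

-- B's first appended candidate is at most start - l (the window there is empty, hence valid)
theorem loopB_head_le (cs : List Char) (l fh start n : Int) (hn : n = (cs.length : Int))
    (hl : l ≤ 0) (hs : 0 ≤ start) (hlt : start < n) (s : Int) (hle : start ≤ s)
    (hsl : s ≤ start - l) (idx : List Int) :
    ∃ h t, loopB cs l fh s ((n - l + 1) - s).toNat idx = idx ++ h :: t ∧ h ≤ start - l := by
  rw [show ((n - l + 1) - s).toNat = ((n - l + 1) - (s + 1)).toNat + 1 from by omega]
  simp only [loopB]
  by_cases hw : ((PySem.List.slice cs (some s) (some (s + l))).all (fun c => c == '#' || c == '?')) = true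
  · rw [if_pos hw]
    split
    · exact ⟨s, [], rfl, hsl⟩
    · obtain ⟨t, ht⟩ := loopB_prefix cs l fh (((n - l + 1) - (s + 1)).toNat) (s + 1) (idx ++ [s])
      exact ⟨s, t, by rw [ht]; simp, hsl⟩
  · rw [if_neg hw]
    have hslt : s < start - l := by
      rcases lt_or_eq_of_le hsl with h | h
      · exact h
      · exfalso
        apply hw
        rw [h, show start - l + l = start by ring, slice_empty_of_le cs _ _ hs (by omega)]
        rfl
    obtain ⟨h, t, ht, hle2⟩ := loopB_head_le cs l fh start n hn hl hs hlt (s + 1) (by omega) (by omega) idx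
    exact ⟨h, t, ht, hle2⟩
termination_by (start - l - s).toNat
decreasing_by all_goals omega

-- ===== VERDICT (by name: the statement is the Claim_ definition above) =====
theorem find_possible_places_spec : Claim_unchanged_find_possible_places := by
  intro data l start _ hs hnd
  have hs' : (0:Int) ≤ start := hs
  show find_possible_places data l start = find_possible_places_alt data l start
  show loopA data.toList l (data.toList.length : Int)
        (PySem.List.pyRange start (data.toList.length : Int) 1) [] 0 (data.toList.length : Int)
      = loopB data.toList l
          (firstHashB data.toList (data.toList.length : Int)
            (PySem.List.pyRange start (data.toList.length : Int) 1))
          start (((data.toList.length : Int) - l + 1) - start).toNat []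
  by_cases hl : 1 ≤ l
  · by_cases hcase : start ≤ (data.toList.length : Int)
    · have h0 := mainA data.toList l start (data.toList.length : Int) rfl hl hs' 0 (by simpa using hcase) []
      have hfb := firstHashB_eq data.toList start (data.toList.length : Int) rfl hs' 0 (by simpa using hcase) rfl
      simp only [Nat.cast_zero, add_zero] at h0 hfb
      rw [max_eq_left (by omega)] at h0
      rw [hfb]
      simpa [runv, fhv] using h0
    · rw [PySem.List.pyRange_one_eq_nil (show (data.toList.length : Int) ≤ start by omega),
          show (((data.toList.length : Int) - l + 1) - start).toNat = 0 from by omega]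
      rfl
  · -- l ≤ 0 and ¬ D_ force start > len(data) - l: both loops run over an empty range
    have hgt : (data.toList.length : Int) - l < start := by
      rcases lt_or_ge ((data.toList.length : Int) - l) start with h | h
      · exact h
      · exact absurd ⟨by omega, hs', h⟩ hnd
    rw [PySem.List.pyRange_one_eq_nil (show (data.toList.length : Int) ≤ start by omega),
        show (((data.toList.length : Int) - l + 1) - start).toNat = 0 from by omega]
    rfl

theorem find_possible_places_changed : Claim_changed_find_possible_places := by
  unfold Claim_changed_find_possible_places; decide

theorem find_possible_places_tight : Claim_exact_find_possible_places := by
  intro data l start _ hs hd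
  obtain ⟨hl, hs', hsn⟩ := hd
  show loopA data.toList l (data.toList.length : Int)
        (PySem.List.pyRange start (data.toList.length : Int) 1) [] 0 (data.toList.length : Int)
      ≠ loopB data.toList l
          (firstHashB data.toList (data.toList.length : Int)
            (PySem.List.pyRange start (data.toList.length : Int) 1))
          start (((data.toList.length : Int) - l + 1) - start).toNat []
  by_cases hlt : start < (data.toList.length : Int)
  · -- A's first element is start - l + 1; B's first element is at most start - l
    have hA : ∃ t, loopA data.toList l (data.toList.length : Int)
        (PySem.List.pyRange start (data.toList.length : Int) 1) [] 0 (data.toList.length : Int)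
        = (start - l + 1) :: t := by
      rw [PySem.List.pyRange_one_cons (by omega)]
      simp only [loopA]
      have key : ∀ st : Int × Int, l ≤ st.1 → ∃ t,
          (if l ≤ st.1 then
            (if st.2 ≤ start - l + 1 then [] ++ [start - l + 1]
             else loopA data.toList l (data.toList.length : Int)
                    (PySem.List.pyRange (start + 1) (data.toList.length : Int) 1)
                    ([] ++ [start - l + 1]) st.1 st.2)
           else loopA data.toList l (data.toList.length : Int)
                  (PySem.List.pyRange (start + 1) (data.toList.length : Int) 1) [] st.1 st.2)
          = (start - l + 1) :: t := by
        intro st hst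
        rw [if_pos hst]
        split_ifs
        · exact ⟨[], rfl⟩
        · obtain ⟨t, ht⟩ := loopA_prefix data.toList l (data.toList.length : Int)
            (PySem.List.pyRange (start + 1) (data.toList.length : Int) 1) ([] ++ [start - l + 1]) st.1 st.2
          exact ⟨t, by rw [ht]; simp⟩
      exact key _ (by split <;> dsimp only <;> omega)
    obtain ⟨tA, hAeq⟩ := hA
    obtain ⟨hB, tB, hBeq, hBle⟩ := loopB_head_le data.toList l _ start (data.toList.length : Int)
      rfl hl hs' hlt start le_rfl (by omega) []
    rw [hAeq, hBeq]
    simp only [List.nil_append]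
    intro heq
    have := (List.cons.injEq _ _ _ _).mp heq
    omega
  · -- start ≥ len(data): A runs over an empty range, while B accepts the empty window at start
    rw [PySem.List.pyRange_one_eq_nil (by omega)]
    rw [show (((data.toList.length : Int) - l + 1) - start).toNat
          = (((data.toList.length : Int) - l + 1) - (start + 1)).toNat + 1 from by omega]
    simp only [loopA, loopB]
    rw [if_pos (by rw [slice_empty_of_ge_len data.toList start (start + l) (by omega)]; rfl)]
    split
    · simp
    · obtain ⟨t, ht⟩ := loopB_prefix data.toList l _
        ((((data.toList.length : Int) - l + 1) - (start + 1)).toNat) (start + 1) ([] ++ [start])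
      rw [ht]
      simp
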